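-- pv_equiv track=rewrite | github.com/yuanjie-li/Project-Euler | 051_prime_digit_replacement.py | makeSingleFamily
-- ===== SOURCE A (Python) =====
-- def makeSingleFamily(n, idx):
--     str_n = str(n)
--     str_n = list(str_n)
--     if idx == 0:
--         start = 1
--     else:
--         start = 0
--
--     output = []
--     for i in range(start, 10):
--         str_n[idx] = str(i)
--         output.append(int(''.join(str_n)))
--
--     return output
-- ===== SOURCE B (Python) =====
-- def makeSingleFamily(n, idx):
--     s = str(n)
--     d = int(s[idx])
--     p = 10 ** (len(s) - 1 - idx % len(s))
--     base = n - d * p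
--     start = 1 if idx == 0 else 0
--     return [base + i * p for i in range(start, 10)]
-- ===== Notes on version B (the rewrite author's own statement) =====
-- stated objective: alternative
-- what changed: B replaces A's per-digit list-splice + ''.join + int() string round-trips by integer place-value arithmetic: it reads the replaced digit d = int(s[idx]) and place value p = 10**(len(s)-1-idx%len(s)) once and emits base + i*p; Pre_ restricts to nonnegative n, the natural domain of decimal digit strings, on which A splices digit characters around the '-' sign of str(n) instead.
-- outside the precondition, e.g. on makeSingleFamily(-283, 0): A returns [1283, 2283, 3283, 4283, 5283, 6283, 7283, 8283, 9283], B raises ValueError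
import Mathlib
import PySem

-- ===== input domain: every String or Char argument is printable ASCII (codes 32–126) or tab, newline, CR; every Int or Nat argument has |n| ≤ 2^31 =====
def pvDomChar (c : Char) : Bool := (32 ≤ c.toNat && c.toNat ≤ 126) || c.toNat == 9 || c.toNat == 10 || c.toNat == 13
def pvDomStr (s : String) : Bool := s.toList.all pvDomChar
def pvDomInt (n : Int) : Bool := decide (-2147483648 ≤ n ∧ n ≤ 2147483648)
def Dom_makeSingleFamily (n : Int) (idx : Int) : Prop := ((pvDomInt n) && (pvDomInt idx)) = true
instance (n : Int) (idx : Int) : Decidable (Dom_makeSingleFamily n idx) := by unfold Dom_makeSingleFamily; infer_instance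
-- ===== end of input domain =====

-- B replaces A's per-digit string splice-join-parse loop with integer place-value
-- arithmetic: the replaced digit and its place value are read once, the family is base + i*p.

-- ===== PORT A =====
-- str_n is a Python list of one-character strings, modelled as List (List Char);
-- ''.join is PySem.Chars.join []; int(...) is PySem.Int.ofChars? — it never raises
-- under Pre_ (the joined string is always a valid integer literal), so .getD 0 is
-- a totalization that is never hit; str_n[idx] = ... is PySem.List.pySetD (total
-- form of the assignment, used under Pre_'s index-in-range condition).
def makeSingleFamily (n : Int) (idx : Int) : List Int :=
  let strN : List (List Char) := (PySem.Int.toChars n).map (fun c => [c])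
  let start : Int := if idx = 0 then 1 else 0
  let res :=
    (PySem.List.pyRange start 10 1).foldl
      (fun (st : List (List Char) × List Int) i =>
        let s' := PySem.List.pySetD st.1 idx (PySem.Int.toChars i)
        (s', st.2 ++ [(PySem.Int.ofChars? (PySem.Chars.join [] s')).getD 0]))
      (strN, [])
  res.2

-- ===== PORT B =====
-- transliteration of Source B: s = str(n) as its character list; d = int(s[idx]) via
-- PySem.List.pyGet? on the char list followed by PySem.Int.ofChars? on the one-char
-- string (the .getD 0 totalizes the IndexError/ValueError cases, never hit under Pre_);
-- p = 10 ** (len(s) - 1 - idx % len(s)); family = [base + i*p].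
def makeSingleFamily_alt (n : Int) (idx : Int) : List Int :=
  let s : List Char := PySem.Int.toChars n
  let d : Int := ((PySem.List.pyGet? s idx).bind (fun c => PySem.Int.ofChars? [c])).getD 0
  let p : Int := 10 ^ ((s.length : Int) - 1 - PySem.Int.mod idx (s.length : Int)).toNat
  let base : Int := n - d * p
  let start : Int := if idx = 0 then 1 else 0
  (PySem.List.pyRange start 10 1).map (fun i => base + i * p)

-- ===== PRECONDITION & SPEC =====
-- Pre_ excludes out-of-range idx, on which A raises IndexError, and negative n,
-- which lies outside the function's natural domain of decimal digit strings (there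
-- A splices digit characters into the signed string representation around the '-'
-- sign — see the cited examples in the claim).
def Pre_makeSingleFamily (n : Int) (idx : Int) : Prop :=
  0 ≤ n ∧ -((PySem.Int.toChars n).length : Int) ≤ idx ∧ idx < ((PySem.Int.toChars n).length : Int)
instance (n : Int) (idx : Int) : Decidable (Pre_makeSingleFamily n idx) := by
  unfold Pre_makeSingleFamily; infer_instance
def pvWitness_makeSingleFamily : Int × Int := (283, 1)

def Spec_makeSingleFamily (n : Int) (idx : Int) (out : List Int) : Prop := out = makeSingleFamily_alt n idx
instance (n : Int) (idx : Int) (out : List Int) : Decidable (Spec_makeSingleFamily n idx out) := by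
  unfold Spec_makeSingleFamily; infer_instance

-- ===== CLAIM (what is proved, stated in full; the proofs are below) =====
def Claim_equal_makeSingleFamily : Prop := ∀ (n : Int) (idx : Int), Dom_makeSingleFamily n idx → Pre_makeSingleFamily n idx → Spec_makeSingleFamily n idx (makeSingleFamily n idx)

-- ===== LEMMAS AND PROOFS =====

def pvAllDig (l : List Char) : Prop := ∀ c ∈ l, 48 ≤ c.toNat ∧ c.toNat ≤ 57

def pvVal (a : Nat) (l : List Char) : Nat :=
  l.foldl (fun a c => a * 10 + (c.toNat - '0'.toNat)) a

def pvDigits (n : Nat) : List Char :=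
  if _h : n < 10 then [Nat.digitChar n]
  else pvDigits (n / 10) ++ [Nat.digitChar (n % 10)]
decreasing_by exact Nat.div_lt_self (by omega) (by omega)

-- ======= ofChars? on digit strings =======
theorem pv_isIntSpace_false {c : Char} (h : 45 ≤ c.toNat) : PySem.Int.isIntSpace c = false := by
  have h32 : c ≠ ' ' := by intro he; subst he; exact absurd h (by decide)
  have h9 : c ≠ '\t' := by intro he; subst he; exact absurd h (by decide)
  have h10 : c ≠ '\n' := by intro he; subst he; exact absurd h (by decide)
  have h13 : c ≠ '\x0d' := by intro he; subst he; exact absurd h (by decide)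
  have h11 : c ≠ '\x0b' := by intro he; subst he; exact absurd h (by decide)
  have h12 : c ≠ '\x0c' := by intro he; subst he; exact absurd h (by decide)
  simp [PySem.Int.isIntSpace, h32, h9, h10, h13, h11, h12]

theorem pv_dropWhile_no (l : List Char) (h : ∀ c ∈ l, PySem.Int.isIntSpace c = false) :
    l.dropWhile PySem.Int.isIntSpace = l := by
  cases l with
  | nil => rfl
  | cons c t => simp [h c (by simp)]

theorem pv_strip_no (l : List Char) (h : ∀ c ∈ l, PySem.Int.isIntSpace c = false) :
    ((l.dropWhile PySem.Int.isIntSpace).reverse.dropWhile PySem.Int.isIntSpace).reverse = l := by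
  rw [pv_dropWhile_no l h, pv_dropWhile_no _ (by simpa using h), List.reverse_reverse]

-- capture the (private) digit-parsing loop of PySem.Int.ofChars? together with its
-- defining equations, so that it can be reasoned about by induction
theorem pv_parse_pack : ∃ (w : List Char → Option Nat) (g : List Char → Bool → Nat → Option Nat),
    (∀ c ds, pvAllDig (c :: ds) → PySem.Int.ofChars? (c :: ds) =
        Option.map (fun n => n) (do let a ← w (c :: ds); pure ((a : Int)))) ∧
    (∀ t, w ('1' :: t) = g t true 1) ∧
    (∀ c t, w (c :: t) = g (c :: t) false 0) ∧
    (∀ b a, g [] b a = if b = true then some a else none) ∧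
    (∀ c t b a, g (c :: t) b a =
      if c.isDigit = true then g t true (a * 10 + (c.toNat - '0'.toNat))
      else if c = '_' ∧ b = true then
        (match t with | d :: _ => if d.isDigit = true then g t false a else none | [] => none)
      else none) := by
  refine ⟨?w, ?g, ?A1, ?WG, ?WL, ?G1, ?G2⟩
  case A1 =>
    intro c ds h
    have hs : ∀ x ∈ c :: ds, PySem.Int.isIntSpace x = false := by
      intro x hx; exact pv_isIntSpace_false (by have := h x hx; omega)
    simp only [PySem.Int.ofChars?]
    rw [pv_strip_no _ hs]
    split
    case h_1 ds2 heq => cases heq; have := h '-' (by simp); exact absurd this (by decide)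
    case h_2 ds2 heq => cases heq; have := h '+' (by simp); exact absurd this (by decide)
    case h_3 => exact rfl
  case WG => intro t; exact rfl
  case WL => intro c t; exact rfl
  case G1 => intro b a; exact rfl
  case G2 => intro c t b a; exact rfl

theorem pv_digit_isDigit {c : Char} (h : 48 ≤ c.toNat ∧ c.toNat ≤ 57) : c.isDigit = true := by
  have h1 : '0'.val ≤ c.val := by
    rw [UInt32.le_iff_toNat_le]
    exact h.1
  have h2 : c.val ≤ '9'.val := by
    rw [UInt32.le_iff_toNat_le]
    exact h.2
  simp only [Char.isDigit]
  rw [decide_eq_true h1, decide_eq_true h2]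
  rfl

theorem pv_val_cons (a : Nat) (c : Char) (t : List Char) :
    pvVal a (c :: t) = pvVal (a * 10 + (c.toNat - '0'.toNat)) t := by
  simp [pvVal]

theorem pv_ofChars_digits (l : List Char) (h : pvAllDig l) (hne : l ≠ []) :
    PySem.Int.ofChars? l = some ((pvVal 0 l : Nat) : Int) := by
  obtain ⟨w, g, hA1, hWG, hWL, hG1, hG2⟩ := pv_parse_pack
  have gval : ∀ t, pvAllDig t → ∀ a, g t true a = some (pvVal a t) := by
    intro t
    induction t with
    | nil => intro _ a; rw [hG1]; rfl
    | cons c t ih =>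
      intro ht a
      rw [hG2, if_pos (pv_digit_isDigit (ht c (by simp))), pv_val_cons]
      exact ih (fun x hx => ht x (by simp [hx])) _
  cases l with
  | nil => exact absurd rfl hne
  | cons c ds =>
    rw [hA1 c ds h, hWL, hG2, if_pos (pv_digit_isDigit (h c (by simp)))]
    rw [gval ds (fun x hx => h x (by simp [hx]))]
    simp [pv_val_cons]

-- ======= toChars = pvDigits =======
theorem pv_toDigitsCore_eq : ∀ (fuel n : Nat) (acc : List Char), n < fuel →
    Nat.toDigitsCore 10 fuel n acc = pvDigits n ++ acc := by
  intro fuel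
  induction fuel with
  | zero => intro n acc h; omega
  | succ fuel ih =>
    intro n acc h
    rw [Nat.toDigitsCore]
    by_cases h10 : n / 10 = 0
    · rw [if_pos h10]
      have hn : n % 10 = n := Nat.mod_eq_of_lt (by omega)
      rw [show pvDigits n = [Nat.digitChar n] from by rw [pvDigits]; exact dif_pos (by omega), hn]
      rfl
    · have hfuel : n / 10 < fuel := by
        have h1 : 10 * (n / 10) ≤ n := Nat.mul_div_le n 10
        have h2 : n / 10 ≠ 0 := h10
        omega
      rw [if_neg h10, ih (n / 10) _ hfuel]
      rw [show pvDigits n = pvDigits (n / 10) ++ [Nat.digitChar (n % 10)] from by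
        rw [pvDigits]; exact dif_neg (by omega)]
      simp

theorem pv_toChars_nonneg (n : Int) (h : 0 ≤ n) :
    PySem.Int.toChars n = pvDigits n.toNat := by
  simp only [PySem.Int.toChars, if_neg (by omega : ¬ n < 0)]
  rw [Nat.toDigits, pv_toDigitsCore_eq _ _ _ (by omega)]
  simp

theorem pv_digitChar_toNat {k : Nat} (h : k < 10) : (Nat.digitChar k).toNat = 48 + k := by
  interval_cases k <;> decide

theorem pv_digits_allDig (m : Nat) : pvAllDig (pvDigits m) := by
  induction m using Nat.strong_induction_on with
  | _ m ih =>
    rw [pvDigits]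
    split
    · intro c hc
      simp at hc
      subst hc
      rw [pv_digitChar_toNat (by omega)]
      omega
    · intro c hc
      rcases List.mem_append.1 hc with hc | hc
      · exact ih (m / 10) (Nat.div_lt_self (by omega) (by omega)) c hc
      · simp at hc; subst hc
        rw [pv_digitChar_toNat (by omega)]
        have := Nat.mod_lt m (y := 10) (by omega)
        omega

theorem pv_digits_ne_nil (m : Nat) : pvDigits m ≠ [] := by
  rw [pvDigits]; split <;> simp

theorem pv_val_append (a : Nat) (xs ys : List Char) :
    pvVal a (xs ++ ys) = pvVal (pvVal a xs) ys := List.foldl_append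

theorem pv_val_shift (l : List Char) : ∀ a, pvVal a l = a * 10 ^ l.length + pvVal 0 l := by
  induction l with
  | nil => intro a; simp [pvVal]
  | cons c t ih =>
    intro a
    rw [pv_val_cons, pv_val_cons, ih, ih (0 * 10 + _)]
    simp [List.length_cons, pow_succ]
    ring

theorem pv_digits_val (m : Nat) : pvVal 0 (pvDigits m) = m := by
  induction m using Nat.strong_induction_on with
  | _ m ih =>
    rw [pvDigits]
    split
    · rename_i h
      rw [pv_val_cons]
      simp [pvVal, pv_digitChar_toNat h]
    · rename_i h
      rw [pv_val_append, ih (m / 10) (Nat.div_lt_self (by omega) (by omega))]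
      rw [pv_val_cons]
      have h10 : m % 10 < 10 := Nat.mod_lt m (by omega)
      simp [pvVal, pv_digitChar_toNat h10]
      omega

theorem pv_toChars_small (i : Int) (h0 : 0 ≤ i) (h10 : i < 10) :
    PySem.Int.toChars i = [Nat.digitChar i.toNat] := by
  rw [pv_toChars_nonneg i h0, pvDigits, dif_pos (by omega)]

-- ======= splice and digit extraction =======
theorem pv_splice : ∀ (u : List Char) (k : Nat), k < u.length → ∀ (c : Char),
    pvVal 0 (u.set k c) + ((u.getD k ' ').toNat - '0'.toNat) * 10 ^ (u.length - 1 - k)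
      = pvVal 0 u + (c.toNat - '0'.toNat) * 10 ^ (u.length - 1 - k) := by
  intro u
  induction u with
  | nil => intro k hk; simp at hk
  | cons c0 t ih =>
    intro k hk c
    cases k with
    | zero =>
      simp only [List.set_cons_zero, List.getD_cons_zero, List.length_cons,
        Nat.add_sub_cancel, Nat.sub_zero]
      rw [pv_val_cons, pv_val_cons, pv_val_shift t (0 * 10 + (c.toNat - '0'.toNat)),
        pv_val_shift t (0 * 10 + (c0.toNat - '0'.toNat))]
      simp only [Nat.zero_mul, Nat.zero_add]
      omega
    | succ k =>
      simp only [List.set_cons_succ, List.getD_cons_succ, List.length_cons]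
      rw [pv_val_cons, pv_val_cons]
      have hk' : k < t.length := by simpa using hk
      have e1 : t.length + 1 - 1 - (k + 1) = t.length - 1 - k := by omega
      rw [e1]
      have h2 := ih k hk' c
      rw [pv_val_shift (t.set k c) (0 * 10 + (c0.toNat - '0'.toNat)),
        pv_val_shift t (0 * 10 + (c0.toNat - '0'.toNat)), List.length_set]
      simp only [Nat.zero_mul, Nat.zero_add]
      omega

-- ======= pyGet?, pySetD and the loop shape =======
theorem pv_pyGet?_norm {α : Type} (s : List α) (idx : Int) (d : α)
    (h1 : -(s.length : Int) ≤ idx) (h2 : idx < (s.length : Int)) :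
    PySem.List.pyGet? s idx = some (s.getD (if idx < 0 then idx + s.length else idx).toNat d) := by
  simp only [PySem.List.pyGet?, PySem.List.pyIdx?]
  by_cases h0 : 0 ≤ idx
  · rw [if_pos h0, if_pos h2]
    simp only [if_neg (by omega : ¬ idx < 0), Option.bind_some]
    rw [List.getElem?_eq_getElem (by omega), List.getD_eq_getElem s d (by omega)]
  · rw [if_neg h0, if_pos (by omega : -(s.length : Int) ≤ idx)]
    simp only [if_pos (by omega : idx < 0), Option.bind_some]
    rw [show s.length - (-idx).toNat = (idx + (s.length : Int)).toNat from by omega]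
    rw [List.getElem?_eq_getElem (by omega), List.getD_eq_getElem s d (by omega)]

theorem pv_pySetD_norm {α : Type} (s : List α) (idx : Int) (v : α)
    (h1 : -(s.length : Int) ≤ idx) (h2 : idx < (s.length : Int)) :
    PySem.List.pySetD s idx v = s.set (if idx < 0 then idx + s.length else idx).toNat v := by
  simp only [PySem.List.pySetD, PySem.List.pySet?, PySem.List.pyIdx?]
  by_cases h0 : 0 ≤ idx
  · rw [if_pos h0, if_pos h2]
    simp [if_neg (by omega : ¬ idx < 0)]
  · rw [if_neg h0, if_pos (by omega : -(s.length : Int) ≤ idx)]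
    simp only [Option.map_some, Option.getD_some, if_pos (by omega : idx < 0)]
    congr 1
    omega

theorem pv_pySetD_pySetD {α : Type} (s : List α) (i : Int) (v v' : α) :
    PySem.List.pySetD (PySem.List.pySetD s i v) i v' = PySem.List.pySetD s i v' := by
  simp only [PySem.List.pySetD, PySem.List.pySet?, PySem.List.pyIdx?]
  by_cases h0 : 0 ≤ i
  · by_cases h2 : i < (s.length : Int)
    · simp [h0, h2, List.length_set, List.set_set]
    · simp [h0, h2]
  · by_cases h2 : -(s.length : Int) ≤ i
    · simp [h0, h2, List.length_set, List.set_set]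
    · simp [h0, h2]

theorem pv_loopA (idx : Int) (l : List Int) (s0 : List (List Char)) (acc : List Int) :
    (l.foldl (fun (st : List (List Char) × List Int) i =>
        (PySem.List.pySetD st.1 idx (PySem.Int.toChars i),
         st.2 ++ [(PySem.Int.ofChars? (PySem.Chars.join []
            (PySem.List.pySetD st.1 idx (PySem.Int.toChars i)))).getD 0]))
      (s0, acc)).2
    = acc ++ l.map (fun i => (PySem.Int.ofChars? (PySem.Chars.join []
        (PySem.List.pySetD s0 idx (PySem.Int.toChars i)))).getD 0) := by
  induction l generalizing s0 acc with
  | nil => simp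
  | cons i l ih =>
    simp only [List.foldl_cons, List.map_cons]
    rw [ih]
    have hcollapse : ∀ i' : Int,
        PySem.List.pySetD (PySem.List.pySetD s0 idx (PySem.Int.toChars i)) idx (PySem.Int.toChars i')
          = PySem.List.pySetD s0 idx (PySem.Int.toChars i') := fun i' => pv_pySetD_pySetD ..
    simp [hcollapse]

-- ======= element arithmetic =======
theorem pv_allDig_set (u : List Char) (hu : pvAllDig u) (jn : Nat) {c : Char}
    (hc : 48 ≤ c.toNat ∧ c.toNat ≤ 57) : pvAllDig (u.set jn c) := by
  intro x hx
  rcases List.mem_or_eq_of_mem_set hx with h | h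
  · exact hu x h
  · subst h; exact hc

theorem pv_digitChar_digit {i : Nat} (hi : i < 10) :
    48 ≤ (Nat.digitChar i).toNat ∧ (Nat.digitChar i).toNat ≤ 57 := by
  rw [pv_digitChar_toNat hi]; omega

theorem pv_arith (u : List Char) (_hu : pvAllDig u) (jn : Nat) (hjn : jn < u.length)
    (i : Nat) (hi : i < 10) :
    ((pvVal 0 (u.set jn (Nat.digitChar i)) : Nat) : Int)
      = ((pvVal 0 u : Nat) : Int)
        - (((u.getD jn ' ').toNat - '0'.toNat : Nat) : Int) * ((10 ^ (u.length - 1 - jn) : Nat) : Int)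
        + (i : Int) * ((10 ^ (u.length - 1 - jn) : Nat) : Int) := by
  have S := pv_splice u jn hjn (Nat.digitChar i)
  have hdc : (Nat.digitChar i).toNat - '0'.toNat = i := by
    rw [pv_digitChar_toNat hi]; simp [show '0'.toNat = 48 from rfl]
  rw [hdc] at S
  have S' : ((pvVal 0 (u.set jn (Nat.digitChar i)) : Nat) : Int)
      + (((u.getD jn ' ').toNat - '0'.toNat : Nat) : Int) * ((10 ^ (u.length - 1 - jn) : Nat) : Int)
      = ((pvVal 0 u : Nat) : Int) + (i : Int) * ((10 ^ (u.length - 1 - jn) : Nat) : Int) := by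
    exact_mod_cast congrArg (fun x : Nat => (x : Int)) S
  linarith [S']

-- ===== VERDICT (by name: the statement is the Claim_ definition above) =====
theorem makeSingleFamily_spec : Claim_equal_makeSingleFamily := by
  unfold Claim_equal_makeSingleFamily
  intro n idx _ hPre
  unfold Pre_makeSingleFamily at hPre
  unfold Spec_makeSingleFamily
  obtain ⟨hn0, hP1, hP2⟩ := hPre
  obtain ⟨m, rfl⟩ : ∃ k : Nat, n = (k : Int) := ⟨n.toNat, (Int.toNat_of_nonneg hn0).symm⟩
  have hcseq : PySem.Int.toChars (m : Int) = pvDigits m := by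
    rw [pv_toChars_nonneg _ (by omega)]; simp
  set u : List Char := pvDigits m with hu
  rw [hcseq] at hP1 hP2
  have hLpos : 0 < u.length := List.length_pos_iff.mpr (pv_digits_ne_nil m)
  -- the normalized index
  set jn : Nat := (if idx < 0 then idx + (u.length : Int) else idx).toNat with hjn
  have hjnlt : jn < u.length := by rw [hjn]; split <;> omega
  have hjeq : (if idx < 0 then idx + (u.length : Int) else idx) = (jn : Int) := by
    rw [hjn]; split <;> omega
  -- idx % len(s) = the normalized index
  have hmod : PySem.Int.mod idx (u.length : Int) = (jn : Int) := by
    rw [PySem.Int.mod_eq_emod_of_pos (by omega), ← hjeq]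
    split
    · rw [← Int.add_emod_right]
      exact Int.emod_eq_of_lt (by omega) (by omega)
    · exact Int.emod_eq_of_lt (by omega) (by omega)
  -- A side to map form
  simp only [makeSingleFamily, hcseq]
  rw [pv_loopA, List.nil_append]
  -- B side
  simp only [makeSingleFamily_alt, hcseq, hmod]
  have hexp : ((u.length : Int) - 1 - (jn : Int)).toNat = u.length - 1 - jn := by omega
  rw [hexp]
  -- the replaced digit d
  have hdig : pvAllDig [u.getD jn ' '] := by
    intro x hx
    simp at hx
    subst hx
    exact pv_digits_allDig m (u.getD jn ' ') (by
      rw [List.getD_eq_getElem u ' ' hjnlt]; exact u.getElem_mem hjnlt)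
  have hvald : pvVal 0 [u.getD jn ' '] = (u.getD jn ' ').toNat - '0'.toNat := by
    simp [pvVal]
  have hd : ((PySem.List.pyGet? u idx).bind (fun c => PySem.Int.ofChars? [c])).getD 0
      = (((u.getD jn ' ').toNat - '0'.toNat : Nat) : Int) := by
    rw [pv_pyGet?_norm u idx ' ' hP1 hP2, hjeq, Int.toNat_natCast, Option.bind_some,
      pv_ofChars_digits _ hdig (by simp), hvald, Option.getD_some]
  rw [hd]
  -- elementwise
  apply List.map_congr_left
  intro i hi
  have hb := PySem.List.mem_pyRange_one.mp hi
  have h0i : 0 ≤ i := by by_cases h : idx = 0 <;> simp [h] at hb <;> omega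
  obtain ⟨iN, rfl⟩ : ∃ k : Nat, i = (k : Int) := ⟨i.toNat, (Int.toNat_of_nonneg h0i).symm⟩
  have hi10 : iN < 10 := by omega
  -- A element
  rw [show PySem.Int.toChars (iN : Int) = [Nat.digitChar iN] from by
    rw [pv_toChars_small _ (by omega) (by omega)]; simp]
  rw [pv_pySetD_norm _ idx _ (by simpa using hP1) (by simpa using hP2),
    List.length_map, hjeq, Int.toNat_natCast, ← List.map_set,
    PySem.Chars.join_nil_singletons]
  have hAll : pvAllDig (u.set jn (Nat.digitChar iN)) :=
    pv_allDig_set _ (pv_digits_allDig _) jn (pv_digitChar_digit hi10)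
  have hne : u.set jn (Nat.digitChar iN) ≠ [] := by
    intro h
    have h2 := congrArg List.length h
    rw [List.length_set, List.length_nil] at h2
    omega
  rw [pv_ofChars_digits _ hAll hne, Option.getD_some,
    pv_arith _ (pv_digits_allDig _) jn hjnlt iN hi10]
  -- B element
  rw [show ((m : Int)) = ((pvVal 0 u : Nat) : Int) from by rw [hu, pv_digits_val]]
  rw [show ((10 : Int) ^ (u.length - 1 - jn))
      = ((10 ^ (u.length - 1 - jn) : Nat) : Int) from by push_cast; ring]
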